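-- pv_equiv track=rewrite | github.com/Isaac-Crane/iSAN | convertToMatrix.py | convertVectorToMatrix
-- ===== SOURCE A (Python) =====
-- def convertVectorToMatrix(vector, size):
--     matrix = []
--     upperIndex = 0
--     lowerIndex = 0
--     for j in range(size):
--         matrix.append([])
--         for k in range(size):
--             if j == k:
--                 matrix[j].append(1)
--             if k > j:
--                 matrix[j].append(vector[upperIndex])
--                 upperIndex += 1
--             if k < j:
--                 matrix[j].append(vector[lowerIndex])
--                 lowerIndex += 1
--     return matrix
-- ===== SOURCE B (Python) =====
-- def convertVectorToMatrix(vector, size):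
--     # Closed-form per-cell indexing: no running counters.
--     # Row j: lower-triangle cell k reads vector[T(j)+k] where T(j)=j*(j-1)//2
--     # (row-major position among lower cells); upper-triangle cell k reads
--     # vector[j*(size-1)-T(j)+(k-j-1)] (row-major position among upper cells).
--     def cell(j, k):
--         if k == j:
--             return 1
--         if k < j:
--             return vector[j * (j - 1) // 2 + k]
--         return vector[j * (size - 1) - j * (j - 1) // 2 + (k - j - 1)]
--     return [[cell(j, k) for k in range(size)] for j in range(size)]
-- ===== Notes on version B (the rewrite author's own statement) =====
-- stated objective: alternative
-- what changed: Replaces A's single nested scan with two running counters (upperIndex/lowerIndex) by a per-cell closed-form index: each triangular cell computes its vector position directly from (j,k,size) via j*(j-1)//2, so no mutable state is threaded through the loops.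
import Mathlib
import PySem

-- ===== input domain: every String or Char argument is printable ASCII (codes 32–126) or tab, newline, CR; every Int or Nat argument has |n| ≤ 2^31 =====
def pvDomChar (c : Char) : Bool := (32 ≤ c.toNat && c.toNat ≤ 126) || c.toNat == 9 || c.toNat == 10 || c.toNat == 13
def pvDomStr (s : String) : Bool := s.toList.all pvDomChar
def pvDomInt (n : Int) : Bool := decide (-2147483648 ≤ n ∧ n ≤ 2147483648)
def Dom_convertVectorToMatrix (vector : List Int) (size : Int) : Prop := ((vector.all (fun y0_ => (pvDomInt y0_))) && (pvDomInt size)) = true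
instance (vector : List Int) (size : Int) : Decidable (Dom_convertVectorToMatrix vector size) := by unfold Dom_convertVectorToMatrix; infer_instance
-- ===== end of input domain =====

-- B replaces A's two running counters by a closed-form index for each triangular cell
-- (objective: alternative decomposition, same asymptotic cost).

-- ===== PORT A =====
-- inner loop body: the three ifs of A, on state (row of matrix[j], upperIndex, lowerIndex)
def pvInnerStep (vector : List Int) (j : Int) (st : List Int × Int × Int) (k : Int) :
    List Int × Int × Int :=
  let row1 := if j = k then st.1 ++ [1] else st.1
  let row2 := if k > j then row1 ++ [PySem.List.pyGetD vector st.2.1 0] else row1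
  let u1 := if k > j then st.2.1 + 1 else st.2.1
  let row3 := if k < j then row2 ++ [PySem.List.pyGetD vector st.2.2 0] else row2
  let l1 := if k < j then st.2.2 + 1 else st.2.2
  (row3, u1, l1)

-- outer loop body: append a fresh row, run the inner loop over range(size)
def pvOuterStep (vector : List Int) (size : Int) (st : List (List Int) × Int × Int) (j : Int) :
    List (List Int) × Int × Int :=
  let inner := (PySem.List.pyRange 0 size 1).foldl (pvInnerStep vector j) ([], st.2.1, st.2.2)
  (st.1 ++ [inner.1], inner.2)

def convertVectorToMatrix (vector : List Int) (size : Int) : List (List Int) :=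
  ((PySem.List.pyRange 0 size 1).foldl (pvOuterStep vector size) ([], 0, 0)).1

-- ===== PORT B =====
-- T(j) = j*(j-1)//2
def pvTri (j : Int) : Int := PySem.Int.floordiv (j * (j - 1)) 2

def pvCell (vector : List Int) (size j k : Int) : Int :=
  if k = j then 1
  else if k < j then PySem.List.pyGetD vector (pvTri j + k) 0
  else PySem.List.pyGetD vector (j * (size - 1) - pvTri j + (k - j - 1)) 0

def convertVectorToMatrix_alt (vector : List Int) (size : Int) : List (List Int) :=
  (PySem.List.pyRange 0 size 1).map
    (fun j => (PySem.List.pyRange 0 size 1).map (pvCell vector size j))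

-- ===== PRECONDITION & SPEC =====
-- Pre_ excludes exactly the inputs on which Python A raises IndexError: a vector
-- shorter than the size*(size-1)/2 triangle entries the matrix needs (B raises there too).
def Pre_convertVectorToMatrix (vector : List Int) (size : Int) : Prop :=
  size ≤ 0 ∨ size * (size - 1) ≤ 2 * (vector.length : Int)
instance (vector : List Int) (size : Int) : Decidable (Pre_convertVectorToMatrix vector size) := by
  unfold Pre_convertVectorToMatrix; infer_instance

def pvWitness_convertVectorToMatrix : List Int × Int := ([4, -5, 6], 3)

def Spec_convertVectorToMatrix (vector : List Int) (size : Int) (out : List (List Int)) : Prop :=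
  out = convertVectorToMatrix_alt vector size
instance (vector : List Int) (size : Int) (out : List (List Int)) :
    Decidable (Spec_convertVectorToMatrix vector size out) := by
  unfold Spec_convertVectorToMatrix; infer_instance

-- ===== CLAIM (what is proved, stated in full; the proofs are below) =====
def Claim_equal_convertVectorToMatrix : Prop :=
  ∀ (vector : List Int) (size : Int), Dom_convertVectorToMatrix vector size →
    Pre_convertVectorToMatrix vector size →
    Spec_convertVectorToMatrix vector size (convertVectorToMatrix vector size)

-- ===== LEMMAS AND PROOFS =====
theorem pvTri_zero : pvTri 0 = 0 := by decide

theorem pvTri_succ (j : Int) : pvTri (j + 1) = pvTri j + j := by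
  unfold pvTri
  rw [PySem.Int.floordiv_eq_ediv_of_pos (by norm_num),
      PySem.Int.floordiv_eq_ediv_of_pos (by norm_num)]
  have h : (j + 1) * (j + 1 - 1) = j * (j - 1) + j * 2 := by ring
  rw [h, Int.add_mul_ediv_right _ _ (by norm_num)]

theorem inner_eval (vector : List Int) (size j : Int) (hj0 : 0 ≤ j) :
    ∀ (m : Nat), (m : Int) ≤ size →
      (PySem.List.pyRange 0 (m : Int) 1).foldl (pvInnerStep vector j)
          ([], j * (size - 1) - pvTri j, pvTri j)
        = ((PySem.List.pyRange 0 (m : Int) 1).map (pvCell vector size j),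
           j * (size - 1) - pvTri j + max 0 ((m : Int) - j - 1),
           pvTri j + min (m : Int) j) := by
  intro m
  induction m with
  | zero =>
      intro _
      simp [PySem.List.pyRange_one_eq_nil (by omega : (0:Int) ≤ 0)]
      omega
  | succ m ih =>
      intro hm
      have hm' : (m : Int) ≤ size := by push_cast at hm ⊢; omega
      have hsplit : PySem.List.pyRange 0 ((m : Int) + 1) 1
          = PySem.List.pyRange 0 (m : Int) 1 ++ [(m : Int)] := by
        exact PySem.List.pyRange_one_succ_right (by omega)
      push_cast
      rw [hsplit, List.foldl_append, List.map_append, ih hm']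
      rcases lt_trichotomy (m : Int) j with hlt | heq | hgt
      · simp only [List.foldl, pvInnerStep, pvCell, if_neg (by omega : ¬ j = (m:Int)),
          if_neg (by omega : ¬ (m:Int) > j), if_pos hlt,
          if_neg (by omega : ¬ (m:Int) = j), List.map, Prod.mk.injEq]
        refine ⟨?_, by omega, by omega⟩
        have : pvTri j + min (m : Int) j = pvTri j + (m : Int) := by omega
        rw [this]
      · simp only [List.foldl, pvInnerStep, pvCell, if_pos heq.symm,
          if_neg (by omega : ¬ (m:Int) > j), if_neg (by omega : ¬ (m:Int) < j),
          if_pos heq, List.map, Prod.mk.injEq]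
        exact ⟨trivial, by omega, by omega⟩
      · simp only [List.foldl, pvInnerStep, pvCell, if_neg (by omega : ¬ j = (m:Int)),
          if_pos hgt, if_neg (by omega : ¬ (m:Int) < j),
          if_neg (by omega : ¬ (m:Int) = j), List.map, Prod.mk.injEq]
        refine ⟨?_, by omega, by omega⟩
        have : j * (size - 1) - pvTri j + max 0 ((m : Int) - j - 1)
            = j * (size - 1) - pvTri j + ((m : Int) - j - 1) := by omega
        rw [this]

theorem outer_eval (vector : List Int) (size : Int) :
    ∀ (n : Nat), (n : Int) ≤ size →
      (PySem.List.pyRange 0 (n : Int) 1).foldl (pvOuterStep vector size) ([], 0, 0)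
        = ((PySem.List.pyRange 0 (n : Int) 1).map
             (fun j => (PySem.List.pyRange 0 size 1).map (pvCell vector size j)),
           (n : Int) * (size - 1) - pvTri (n : Int), pvTri (n : Int)) := by
  intro n
  induction n with
  | zero =>
      intro _
      simp [PySem.List.pyRange_one_eq_nil (by omega : (0:Int) ≤ 0), pvTri_zero]
  | succ n ih =>
      intro hn
      have hn' : (n : Int) ≤ size := by push_cast at hn ⊢; omega
      have hnlt : (n : Int) < size := by push_cast at hn; omega
      have hsplit : PySem.List.pyRange 0 ((n : Int) + 1) 1
          = PySem.List.pyRange 0 (n : Int) 1 ++ [(n : Int)] := by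
        exact PySem.List.pyRange_one_succ_right (by omega)
      push_cast
      rw [hsplit, List.foldl_append, List.map_append, ih hn']
      have hsz : PySem.List.pyRange 0 size 1 = PySem.List.pyRange 0 ((size.toNat : Int)) 1 := by
        rw [Int.toNat_of_nonneg (by omega)]
      simp only [List.foldl, pvOuterStep]
      rw [hsz, inner_eval vector size (n : Int) (by positivity) size.toNat
            (by rw [Int.toNat_of_nonneg (by omega)])]
      rw [Int.toNat_of_nonneg (by omega : (0:Int) ≤ size)]
      simp only [List.map, Prod.mk.injEq]
      refine ⟨trivial, ?_, ?_⟩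
      · have h1 : pvTri ((n : Int) + 1) = pvTri (n : Int) + (n : Int) := pvTri_succ _
        have h2 : ((n : Int) + 1) * (size - 1) = (n : Int) * (size - 1) + (size - 1) := by ring
        rw [h1, h2]; omega
      · rw [pvTri_succ]; omega

-- ===== VERDICT (by name: the statement is the Claim_ definition above) =====
theorem convertVectorToMatrix_spec : Claim_equal_convertVectorToMatrix := by
  intro vector size _ _
  unfold Spec_convertVectorToMatrix convertVectorToMatrix convertVectorToMatrix_alt
  by_cases hle : size ≤ 0
  · rw [PySem.List.pyRange_one_eq_nil hle]; rfl
  · have hsz : PySem.List.pyRange 0 size 1 = PySem.List.pyRange 0 ((size.toNat : Int)) 1 := by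
      rw [Int.toNat_of_nonneg (by omega)]
    rw [hsz, outer_eval vector size size.toNat (by rw [Int.toNat_of_nonneg (by omega)])]
    simp only [hsz]
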